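-- pv_equiv track=rewrite | github.com/mintropy/PS | 10000/10703.py | find_meteor
-- ===== SOURCE A (Python) =====
-- def find_meteor(r: int, s: int, picture: list) -> tuple:
--     # 유성 전체
--     meteor = []
--     # 유성에서 확인하면 되는 부분
--     # 모든 열에서 가장 밑부분만 확인하면 됨
--     meteor_check = [-1] * s
--     for i in range(r):
--         for j in range(s):
--             if picture[i][j] == 'X':
--                 meteor.append([i,j])
--                 if meteor_check[j] < i:
--                     meteor_check[j] = i
--
--     return meteor, meteor_check
-- ===== SOURCE B (Python) =====
-- def find_meteor(r: int, s: int, picture: list) -> tuple: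
--     # All meteor cells, row-major, via a comprehension.
--     meteor = [[i, j] for i in range(r) for j in range(s) if picture[i][j] == 'X']
--     # Bottommost 'X' row per column: scan each column bottom-up, break at first hit.
--     meteor_check = []
--     for j in range(s):
--         val = -1
--         for i in range(r - 1, -1, -1):
--             if picture[i][j] == 'X':
--                 val = i
--                 break
--         meteor_check.append(val)
--     return meteor, meteor_check
-- ===== Notes on version B (the rewrite author's own statement) =====
-- stated objective: alternative
-- what changed: A fuses everything into one row-major pass that maintains a running per-column maximum in meteor_check; B makes two differently-shaped passes: a row-major comprehension collecting the X cells, and an independent column-major bottom-up scan that breaks at the first X per column (default -1).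
import Mathlib
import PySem

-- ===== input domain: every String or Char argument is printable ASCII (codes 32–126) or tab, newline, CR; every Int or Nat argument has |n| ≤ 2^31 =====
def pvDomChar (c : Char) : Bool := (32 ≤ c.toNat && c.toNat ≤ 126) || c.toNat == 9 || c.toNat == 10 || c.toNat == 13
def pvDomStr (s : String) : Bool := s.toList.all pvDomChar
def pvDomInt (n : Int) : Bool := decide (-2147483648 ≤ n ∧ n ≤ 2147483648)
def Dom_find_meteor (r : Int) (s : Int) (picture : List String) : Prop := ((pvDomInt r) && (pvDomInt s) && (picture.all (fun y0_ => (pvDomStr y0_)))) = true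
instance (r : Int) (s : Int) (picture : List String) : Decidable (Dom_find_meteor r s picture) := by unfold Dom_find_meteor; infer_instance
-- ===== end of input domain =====

-- B replaces A's single fused row-major pass (running per-column maximum) by two independent
-- passes: a row-major comprehension for the X cells and a column-major bottom-up early-break
-- scan for the bottommost X per column (objective: alternative decomposition, same cost).


-- picture[i][j] as a Char; the getD defaults are never reached under Pre_find_meteor
def pvCell (picture : List String) (i j : Int) : Char :=
  (PySem.Str.pyGet? ((PySem.List.pyGet? picture i).getD "") j).getD ' '

-- ===== PORT A =====
def find_meteor (r : Int) (s : Int) (picture : List String) : List (List Int) × List Int :=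
  let meteor : List (List Int) := []
  let meteor_check : List Int := List.replicate s.toNat (-1)
  (PySem.List.pyRange 0 r 1).foldl (fun st i =>
    (PySem.List.pyRange 0 s 1).foldl (fun st j =>
      if pvCell picture i j = 'X' then
        (st.1 ++ [[i, j]],
         if PySem.List.pyGetD st.2 j 0 < i then PySem.List.pySetD st.2 j i else st.2)
      else st) st) (meteor, meteor_check)

-- ===== PORT B =====
-- bottom-up early-break column scan: first i from r-1 down to 0 with an 'X', else -1
def pvColCheck (r : Int) (picture : List String) (j : Int) : Int :=
  ((PySem.List.pyRange (r - 1) (-1) (-1)).find? (fun i => pvCell picture i j == 'X')).getD (-1)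

def find_meteor_alt (r : Int) (s : Int) (picture : List String) : List (List Int) × List Int :=
  ((PySem.List.pyRange 0 r 1).flatMap (fun i =>
      (PySem.List.pyRange 0 s 1).filterMap (fun j =>
        if pvCell picture i j = 'X' then some [i, j] else none)),
   (PySem.List.pyRange 0 s 1).map (pvColCheck r picture))

-- ===== PRECONDITION & SPEC =====
-- Pre_ excludes exactly the inputs where Python A raises IndexError: if 0 < s, every row
-- index 0..r-1 must exist in picture and each such row must have at least s characters.
def Pre_find_meteor (r : Int) (s : Int) (picture : List String) : Prop :=
  0 < s → (r ≤ (picture.length : Int) ∧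
    ∀ t ∈ picture.take r.toNat, s ≤ (t.length : Int))
instance (r : Int) (s : Int) (picture : List String) : Decidable (Pre_find_meteor r s picture) := by unfold Pre_find_meteor; infer_instance
def pvWitness_find_meteor : Int × Int × List String := (2, 3, ["X..", ".X."])

def Spec_find_meteor (r : Int) (s : Int) (picture : List String) (out : List (List Int) × List Int) : Prop := out = find_meteor_alt r s picture
instance (r : Int) (s : Int) (picture : List String) (out : List (List Int) × List Int) : Decidable (Spec_find_meteor r s picture out) := by unfold Spec_find_meteor; infer_instance

-- ===== CLAIM (what is proved, stated in full; the proofs are below) =====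
def Claim_equal_find_meteor : Prop := ∀ (r : Int) (s : Int) (picture : List String), Dom_find_meteor r s picture → Pre_find_meteor r s picture → Spec_find_meteor r s picture (find_meteor r s picture)

-- ===== LEMMAS AND PROOFS =====

-- the two pointwise-equal components of A's inner loop body
theorem pv_step_split (picture : List String) (i : Int) :
    (fun (st : List (List Int) × List Int) (j : Int) =>
      if pvCell picture i j = 'X' then
        (st.1 ++ [[i, j]],
         if PySem.List.pyGetD st.2 j 0 < i then PySem.List.pySetD st.2 j i else st.2)
      else st)
    = (fun st j =>
        ((if pvCell picture i j = 'X' then st.1 ++ [[i, j]] else st.1),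
         (if pvCell picture i j = 'X' ∧ PySem.List.pyGetD st.2 j 0 < i then
            PySem.List.pySetD st.2 j i else st.2))) := by
  funext st j
  by_cases h : pvCell picture i j = 'X' <;> simp [h]

theorem pv_filterMap_if (l : List Int) (p : Int → Prop) [DecidablePred p] (f : Int → List Int) :
    l.filterMap (fun x => if p x then some (f x) else none)
      = (l.filter (fun x => decide (p x))).map f := by
  induction l with
  | nil => rfl
  | cons x l ih => by_cases h : p x <;> simp [h, ih]

-- A's fused per-row column update, applied to a column-indexed map, updates each entry in place
theorem pv_fold_set (q : Int → Int → Prop) [∀ j v, Decidable (q j v)] (f g : Int → Int)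
    (b : Int) :
    ∀ (k : Nat) (a : Int), 0 ≤ a → (b - a).toNat = k → ∀ (pre : List Int), pre.length = a.toNat →
    (PySem.List.pyRange a b 1).foldl
        (fun c j => if q j (PySem.List.pyGetD c j 0) then PySem.List.pySetD c j (f j) else c)
        (pre ++ (PySem.List.pyRange a b 1).map g)
      = pre ++ (PySem.List.pyRange a b 1).map (fun j => if q j (g j) then f j else g j) := by
  intro k
  induction k with
  | zero =>
    intro a ha hk pre hpre
    rw [PySem.List.pyRange_one_eq_nil (by omega)]
    simp
  | succ k ih =>
    intro a ha hk pre hpre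
    have hab : a < b := by omega
    rw [PySem.List.pyRange_one_cons hab]
    simp only [List.map_cons, List.foldl_cons]
    have hget : PySem.List.pyGetD (pre ++ g a :: (PySem.List.pyRange (a+1) b 1).map g) a 0 = g a := by
      have h2 : a = ((pre.length : Nat) : Int) := by omega
      rw [h2, PySem.List.pyGetD_natCast]
      simp
    have hset : PySem.List.pySetD (pre ++ g a :: (PySem.List.pyRange (a+1) b 1).map g) a (f a)
        = pre ++ f a :: (PySem.List.pyRange (a+1) b 1).map g := by
      rw [PySem.List.pySetD_of_nonneg _ _ ha]
      have h1 : a.toNat = pre.length := by omega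
      rw [h1, List.set_append_right _ _ (le_refl _)]
      simp
    rw [hget]
    have key : ∀ v : Int,
        (PySem.List.pyRange (a+1) b 1).foldl
          (fun c j => if q j (PySem.List.pyGetD c j 0) then PySem.List.pySetD c j (f j) else c)
          ((pre ++ [v]) ++ (PySem.List.pyRange (a+1) b 1).map g)
        = (pre ++ [v]) ++ (PySem.List.pyRange (a+1) b 1).map (fun j => if q j (g j) then f j else g j) := by
      intro v
      exact ih (a+1) (by omega) (by omega) (pre ++ [v]) (by simp; omega)
    by_cases hq : q a (g a)
    · rw [if_pos hq, hset]
      have hv := key (f a)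
      simpa [hq] using hv
    · rw [if_neg hq]
      have hv := key (g a)
      simpa [hq] using hv

-- B's column scan never returns a value ≥ its row bound
theorem pv_colCheck_lt (r : Int) (hr : 0 ≤ r) (picture : List String) (j : Int) :
    pvColCheck r picture j < r := by
  unfold pvColCheck
  cases hf : (PySem.List.pyRange (r - 1) (-1) (-1)).find? (fun i => pvCell picture i j == 'X') with
  | none => simp; omega
  | some x =>
    have hx := List.mem_of_find?_eq_some hf
    rw [PySem.List.mem_pyRange_neg_one] at hx
    simp
    omega

-- unfolding B's column scan one row (the bottom one) at a time
theorem pv_colCheck_succ (t : Int) (ht : 0 ≤ t) (picture : List String) (j : Int) :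
    pvColCheck (t + 1) picture j
      = if pvCell picture t j = 'X' then t else pvColCheck t picture j := by
  unfold pvColCheck
  have h1 : t + 1 - 1 = t := by ring
  rw [h1, PySem.List.pyRange_neg_one_cons (by omega)]
  by_cases h : pvCell picture t j = 'X' <;> simp [h]

-- A's running per-column maximum over the first t rows equals B's column scans bounded by t
theorem pv_check_inv (picture : List String) (s : Int) :
    ∀ (k : Nat) (t : Int), 0 ≤ t → t.toNat = k →
    (PySem.List.pyRange 0 t 1).foldl
        (fun c i => (PySem.List.pyRange 0 s 1).foldl
          (fun c j => if pvCell picture i j = 'X' ∧ PySem.List.pyGetD c j 0 < i then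
              PySem.List.pySetD c j i else c) c)
        (List.replicate s.toNat (-1))
      = (PySem.List.pyRange 0 s 1).map (pvColCheck t picture) := by
  intro k
  induction k with
  | zero =>
    intro t ht hk
    have ht0 : t = 0 := by omega
    subst ht0
    rw [PySem.List.pyRange_one_eq_nil (a := 0) (b := 0) (by omega)]
    simp only [List.foldl_nil]
    have hc : pvColCheck 0 picture = fun _ => (-1 : Int) := by
      funext j
      unfold pvColCheck
      rw [PySem.List.pyRange_neg_one_eq_nil (by omega)]
      rfl
    rw [hc, List.map_const', PySem.List.length_pyRange_one]
    simp
  | succ k ih =>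
    intro t ht hk
    have h1 : t = (t - 1) + 1 := by ring
    have ht1 : (0:Int) ≤ t - 1 := by omega
    rw [h1, PySem.List.pyRange_one_succ_right (by omega)]
    rw [List.foldl_append]
    rw [ih (t - 1) ht1 (by omega)]
    simp only [List.foldl_cons, List.foldl_nil]
    have hfold := pv_fold_set
      (fun j v => pvCell picture (t-1) j = 'X' ∧ v < t - 1)
      (fun _ => t - 1) (pvColCheck (t-1) picture) s s.toNat 0 (le_refl 0)
      (by simp) [] (by simp)
    simp only [List.nil_append] at hfold
    rw [hfold]
    congr 1
    funext j
    rw [pv_colCheck_succ (t-1) ht1]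
    have hlt := pv_colCheck_lt (t-1) ht1 picture j
    by_cases h : pvCell picture (t-1) j = 'X' <;> simp [h, hlt]

-- ===== VERDICT =====
theorem find_meteor_spec : Claim_equal_find_meteor := by
  intro r s picture _ _
  unfold Spec_find_meteor find_meteor find_meteor_alt
  simp only []
  -- split A's fused loop into two independent accumulators
  have hsplit : (fun (st : List (List Int) × List Int) (i : Int) =>
      (PySem.List.pyRange 0 s 1).foldl (fun st j =>
        if pvCell picture i j = 'X' then
          (st.1 ++ [[i, j]],
           if PySem.List.pyGetD st.2 j 0 < i then PySem.List.pySetD st.2 j i else st.2)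
        else st) st)
      = (fun st i =>
        ((PySem.List.pyRange 0 s 1).foldl
            (fun m j => if pvCell picture i j = 'X' then m ++ [[i, j]] else m) st.1,
         (PySem.List.pyRange 0 s 1).foldl
            (fun c j => if pvCell picture i j = 'X' ∧ PySem.List.pyGetD c j 0 < i then
                PySem.List.pySetD c j i else c) st.2)) := by
    funext st i
    rw [pv_step_split picture i]
    cases st with
    | mk m c =>
      exact PySem.List.foldl_prod_mk
        (f := fun m j => if pvCell picture i j = 'X' then m ++ [[i, j]] else m)
        (g := fun c j => if pvCell picture i j = 'X' ∧ PySem.List.pyGetD c j 0 < i then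
            PySem.List.pySetD c j i else c) _ m c
  rw [hsplit, PySem.List.foldl_prod_mk
    (f := fun m i => (PySem.List.pyRange 0 s 1).foldl
        (fun m j => if pvCell picture i j = 'X' then m ++ [[i, j]] else m) m)
    (g := fun c i => (PySem.List.pyRange 0 s 1).foldl
        (fun c j => if pvCell picture i j = 'X' ∧ PySem.List.pyGetD c j 0 < i then
            PySem.List.pySetD c j i else c) c)]
  refine Prod.ext ?_ ?_
  · -- the meteor list: A's fused appends = B's row-major comprehension
    simp only []
    have hrow : (fun (m : List (List Int)) (i : Int) =>
        (PySem.List.pyRange 0 s 1).foldl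
          (fun m j => if pvCell picture i j = 'X' then m ++ [[i, j]] else m) m)
        = (fun m i => m ++
            ((PySem.List.pyRange 0 s 1).filter
              (fun j => decide (pvCell picture i j = 'X'))).map (fun j => [i, j])) := by
      funext m i
      exact PySem.List.foldl_append_ite _ _ _ _
    rw [hrow, PySem.List.foldl_append_eq_flatMap]
    simp only [List.nil_append]
    refine List.flatMap_congr ?_
    intro i _
    rw [pv_filterMap_if]
  · -- the per-column check list
    simp only []
    by_cases hr : 0 ≤ r
    · exact pv_check_inv picture s r.toNat r hr rfl
    · rw [PySem.List.pyRange_one_eq_nil (a := 0) (b := r) (by omega)]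
      simp only [List.foldl_nil]
      have hc : ∀ j : Int, pvColCheck r picture j = -1 := by
        intro j
        unfold pvColCheck
        rw [PySem.List.pyRange_neg_one_eq_nil (by omega)]
        rfl
      calc List.replicate s.toNat (-1 : Int)
          = (PySem.List.pyRange 0 s 1).map (fun _ => (-1 : Int)) := by
            rw [List.map_const', PySem.List.length_pyRange_one]
            simp
        _ = (PySem.List.pyRange 0 s 1).map (pvColCheck r picture) := by
            refine List.map_congr_left ?_
            intro j _
            rw [hc j]
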